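-- pv_equiv track=rewrite | github.com/ercoppa/nb2md | nb2md.py | _separate_display_math
-- ===== SOURCE A (Python) =====
-- from typing import Dict, List, Any, Optional, Tuple
--
-- def _separate_display_math(content: str) -> str:
--     """Ensure display math blocks ($$ ... $$) are separated from surrounding text.
--
--     Some markdown renderers can treat text immediately adjacent to display-math
--     blocks as part of the same paragraph/block, which may cause the text to
--     inherit centering/styling meant for display math.
--     """
--     lines = content.split('\n')
--     out: List[str] = []
--     in_display_math = False
--     skip_following_blank_lines = False
--
--     for idx, line in enumerate(lines):
--         stripped = line.strip()
--
--         if skip_following_blank_lines and stripped == '':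
--             continue
--         if stripped != '':
--             skip_following_blank_lines = False
--
--         is_delimiter = stripped == '$$'
--
--         if is_delimiter:
--             if not in_display_math:
--                 # Opening $$: ensure exactly one blank line before it if preceded by text.
--                 if out and out[-1].strip() != '':
--                     out.append('')
--                 out.append('$$')
--                 in_display_math = True
--                 continue
--
--             # Closing $$: never allow blank lines right before it (inside the block)
--             while out and out[-1].strip() == '':
--                 out.pop()
--             out.append('$$')
--             in_display_math = False
--
--             # If there's more non-empty content after the block (and it's not another $$),
--             # add exactly one blank line after the closing delimiter.
--             j = idx + 1
--             while j < len(lines) and lines[j].strip() == '':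
--                 j += 1
--             if j < len(lines) and lines[j].strip() != '$$':
--                 out.append('')
--                 # Skip any notebook-provided blank lines that follow; we've normalized to one.
--                 skip_following_blank_lines = True
--             continue
--
--         if in_display_math:
--             # Inside $$...$$: drop all blank/whitespace-only lines.
--             if stripped == '':
--                 continue
--             out.append(line)
--             continue
--
--         out.append(line)
--
--     return '\n'.join(out)
-- ===== SOURCE B (Python) =====
-- def _separate_display_math(content: str) -> str:
--     """Block-at-a-time rewrite: consume each $$-block with an inner loop
--     instead of per-line state flags."""
--     lines = content.split('\n')
--     n = len(lines)
--     out = []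
--     i = 0
--     while i < n:
--         line = lines[i]
--         if line.strip() != '$$':
--             out.append(line)
--             i += 1
--             continue
--         # Opening delimiter: one blank separator if preceded by text.
--         if out and out[-1].strip() != '':
--             out.append('')
--         out.append('$$')
--         i += 1
--         # Consume the block body, keeping only non-blank lines.
--         body = []
--         closed = False
--         while i < n:
--             s = lines[i].strip()
--             i += 1
--             if s == '$$':
--                 closed = True
--                 break
--             if s != '':
--                 body.append(lines[i - 1])
--         out.extend(body)
--         if not closed:
--             break
--         out.append('$$')
--         # One blank after the block iff followed by text that is not another block.
--         j = i
--         while j < n and lines[j].strip() == '':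
--             j += 1
--         if j < n and lines[j].strip() != '$$':
--             out.append('')
--             i = j
--     return '\n'.join(out)
-- ===== Notes on version B (the rewrite author's own statement) =====
-- stated objective: alternative
-- what changed: Replaces A's interleaved per-line state machine (in_display_math / skip_following_blank_lines flags and a dead out.pop() loop) with a block-at-a-time outer loop that consumes each $$-block with inner loops (body collection, lookahead jump), emitting whole blocks at once.
import Mathlib
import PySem

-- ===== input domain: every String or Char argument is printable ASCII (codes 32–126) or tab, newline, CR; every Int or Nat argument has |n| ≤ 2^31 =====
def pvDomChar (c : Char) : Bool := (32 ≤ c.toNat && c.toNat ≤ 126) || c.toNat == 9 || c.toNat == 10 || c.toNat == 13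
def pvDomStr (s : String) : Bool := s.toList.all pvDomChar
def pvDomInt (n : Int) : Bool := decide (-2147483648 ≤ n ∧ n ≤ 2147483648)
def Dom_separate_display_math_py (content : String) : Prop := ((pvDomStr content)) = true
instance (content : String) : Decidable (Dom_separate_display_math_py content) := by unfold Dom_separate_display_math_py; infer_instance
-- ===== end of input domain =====

-- B is an 'alternative' decomposition: it consumes each $$-block with inner loops instead of
-- A's per-line state machine with flags; same return value (no side effects involved).

-- ===== PORT A =====
-- while out and out[-1].strip() == '': out.pop()
def popBlanksA (out : List String) : List String :=
  if out ≠ [] ∧ PySem.Str.strip out.getLast! = "" then popBlanksA out.dropLast else out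
termination_by out.length
decreasing_by
  rename_i h
  cases out with
  | nil => exact absurd rfl h.1
  | cons a t => exact Nat.lt_of_lt_of_le (by simp) le_rfl

-- j = idx + 1; while j < len(lines) and lines[j].strip() == '': j += 1   (returns lines[j:])
def skipBlanksA : List String → List String
  | [] => []
  | l :: rest => if PySem.Str.strip l = "" then skipBlanksA rest else l :: rest

-- the for-loop of A, as a tail recursion over the remaining lines with A's two flags
def loopA (out : List String) (inMath skip : Bool) : List String → List String
  | [] => out
  | line :: rest =>
    let s := PySem.Str.strip line
    if skip = true ∧ s = "" then loopA out inMath skip rest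
    else
      let skip1 := if s ≠ "" then false else skip
      if s = "$$" then
        if inMath = false then
          -- opening $$
          let out1 := if out ≠ [] ∧ PySem.Str.strip out.getLast! ≠ "" then out ++ [""] else out
          loopA (out1 ++ ["$$"]) true skip1 rest
        else
          -- closing $$
          let out1 := popBlanksA out ++ ["$$"]
          let rest' := skipBlanksA rest
          if rest' ≠ [] ∧ PySem.Str.strip rest'.head! ≠ "$$" then
            loopA (out1 ++ [""]) false true rest
          else
            loopA out1 false skip1 rest
      else
        if inMath = true then
          if s = "" then loopA out inMath skip1 rest
          else loopA (out ++ [line]) inMath skip1 rest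
        else loopA (out ++ [line]) inMath skip1 rest

def separate_display_math_py (content : String) : String :=
  PySem.Str.join "\n" (loopA [] false false (((PySem.Str.split? content "\n").getD [])))

-- ===== PORT B =====
-- Source B's inner body loop: collect non-blank body lines until a closing '$$' (some rest) or EOF (none)
def consumeBodyB : List String → List String × Option (List String)
  | [] => ([], none)
  | l :: rest =>
    let s := PySem.Str.strip l
    if s = "$$" then ([], some rest)
    else if s = "" then consumeBodyB rest
    else
      let p := consumeBodyB rest
      (l :: p.1, p.2)

-- Source B's lookahead loop: j = i; while j < n and lines[j].strip() == '': j += 1   (returns lines[j:])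
def skipBlanksB : List String → List String
  | [] => []
  | l :: rest => if PySem.Str.strip l = "" then skipBlanksB rest else l :: rest

theorem consumeBodyB_length : ∀ (ls r : List String) (b : List String),
    consumeBodyB ls = (b, some r) → r.length < ls.length := by
  intro ls
  induction ls with
  | nil => intro r b h; simp [consumeBodyB] at h
  | cons l rest ih =>
    intro r b h
    simp only [consumeBodyB] at h
    split_ifs at h with h1 h2
    · cases h; simp
    · exact Nat.lt_succ_of_lt (ih r b h)
    · have := ih r (consumeBodyB rest).1 (by
        have : (consumeBodyB rest).2 = some r := congrArg Prod.snd h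
        exact Prod.ext rfl this)
      exact Nat.lt_succ_of_lt this

theorem skipBlanksB_length : ∀ ls : List String, (skipBlanksB ls).length ≤ ls.length := by
  intro ls
  induction ls with
  | nil => simp [skipBlanksB]
  | cons l rest ih =>
    simp only [skipBlanksB]
    split_ifs
    · exact Nat.le_succ_of_le ih
    · simp

-- Source B's outer while loop: copy text lines until a '$$', then handle a whole block at once
def loopB (out : List String) : List String → List String
  | [] => out
  | line :: rest =>
    if PySem.Str.strip line = "$$" then
      let out1 := if out ≠ [] ∧ PySem.Str.strip out.getLast! ≠ "" then out ++ [""] else out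
      match hcb : consumeBodyB rest with
      | (body, none) => out1 ++ ["$$"] ++ body
      | (body, some rest2) =>
        let out2 := out1 ++ ["$$"] ++ body ++ ["$$"]
        let rest3 := skipBlanksB rest2
        if rest3 ≠ [] ∧ PySem.Str.strip rest3.head! ≠ "$$" then
          loopB (out2 ++ [""]) rest3
        else
          loopB out2 rest2
    else loopB (out ++ [line]) rest
termination_by ls => ls.length
decreasing_by
  · exact Nat.lt_succ_of_le (le_trans (skipBlanksB_length _) (Nat.le_of_lt (consumeBodyB_length _ _ _ hcb)))
  · exact Nat.lt_succ_of_lt (consumeBodyB_length _ _ _ hcb)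
  · simp

def separate_display_math_py_alt (content : String) : String :=
  PySem.Str.join "\n" (loopB [] (((PySem.Str.split? content "\n").getD [])))

-- ===== PRECONDITION & SPEC =====
def Spec_separate_display_math_py (content : String) (out : String) : Prop := out = separate_display_math_py_alt content
instance (content : String) (out : String) : Decidable (Spec_separate_display_math_py content out) := by unfold Spec_separate_display_math_py; infer_instance

-- ===== CLAIM (what is proved, stated in full; the proofs are below) =====
def Claim_equal_separate_display_math_py : Prop := ∀ (content : String), Dom_separate_display_math_py content → Spec_separate_display_math_py content (separate_display_math_py content)

-- ===== LEMMAS AND PROOFS =====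

theorem getLastBang_concat (l : List String) (a : String) : (l ++ [a]).getLast! = a := by
  cases l with
  | nil => rfl
  | cons x t => simp [List.getLast!]

theorem skipBlanks_eq : ∀ ls : List String, skipBlanksA ls = skipBlanksB ls := by
  intro ls
  induction ls with
  | nil => rfl
  | cons l rest ih => simp only [skipBlanksA, skipBlanksB, ih]

-- the skip-flag state is the same as first dropping the blank lines
theorem loopA_skip : ∀ (ls out : List String),
    loopA out false true ls = loopA out false false (skipBlanksA ls) := by
  intro ls
  induction ls with
  | nil => intro out; rfl
  | cons l rest ih =>
    intro out
    by_cases hb : PySem.Str.strip l = ""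
    · rw [skipBlanksA, if_pos hb, ← ih out]
      simp only [loopA, hb]
      simp
    · rw [skipBlanksA, if_neg hb]
      simp only [loopA, hb]
      simp [hb]

-- popping trailing blanks is a no-op when the last emitted line is non-blank
theorem popBlanksA_nonblank (out : List String) (h2 : PySem.Str.strip out.getLast! ≠ "") :
    popBlanksA out = out := by
  rw [popBlanksA, if_neg (fun hc => h2 hc.2)]

-- what A computes from the inside-a-block state, phrased over B's block primitives
def mathRHS (out : List String) (ls : List String) : List String :=
  match consumeBodyB ls with
  | (body, none) => out ++ body
  | (body, some rest2) =>
    let out2 := out ++ body ++ ["$$"]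
    let rest3 := skipBlanksB rest2
    if rest3 ≠ [] ∧ PySem.Str.strip rest3.head! ≠ "$$" then loopB (out2 ++ [""]) rest3
    else loopB out2 rest2

theorem mathRHS_nil (out : List String) : mathRHS out [] = out := by
  simp [mathRHS, consumeBodyB]

theorem mathRHS_blank (out : List String) (l : String) (rest : List String)
    (hb : PySem.Str.strip l = "") : mathRHS out (l :: rest) = mathRHS out rest := by
  unfold mathRHS
  rw [show consumeBodyB (l :: rest) = consumeBodyB rest from by
    simp only [consumeBodyB, hb]; simp]

theorem mathRHS_close (out : List String) (l : String) (rest : List String)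
    (hd : PySem.Str.strip l = "$$") :
    mathRHS out (l :: rest) =
      (if skipBlanksB rest ≠ [] ∧ PySem.Str.strip (skipBlanksB rest).head! ≠ "$$" then
        loopB (out ++ ["$$"] ++ [""]) (skipBlanksB rest)
      else loopB (out ++ ["$$"]) rest) := by
  unfold mathRHS
  rw [show consumeBodyB (l :: rest) = ([], some rest) from by simp only [consumeBodyB, hd]; simp]
  simp

theorem mathRHS_text (out : List String) (l : String) (rest : List String)
    (hb : PySem.Str.strip l ≠ "") (hd : PySem.Str.strip l ≠ "$$") :
    mathRHS out (l :: rest) = mathRHS (out ++ [l]) rest := by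
  unfold mathRHS
  rw [show consumeBodyB (l :: rest) = (l :: (consumeBodyB rest).1, (consumeBodyB rest).2) from by
    simp only [consumeBodyB, hb, hd]; simp]
  rcases hc : consumeBodyB rest with ⟨body, r⟩
  cases r <;> simp [List.append_assoc]

theorem loopB_cons_math (out : List String) (line : String) (rest : List String)
    (hd : PySem.Str.strip line = "$$") :
    loopB out (line :: rest) =
      mathRHS ((if out ≠ [] ∧ PySem.Str.strip out.getLast! ≠ "" then out ++ [""] else out) ++ ["$$"]) rest := by
  rw [loopB, if_pos hd]
  unfold mathRHS
  rcases hc : consumeBodyB rest with ⟨body, r⟩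
  cases r with
  | none => simp [List.append_assoc]
  | some rest2 => simp [List.append_assoc]

theorem loopB_cons_text (out : List String) (line : String) (rest : List String)
    (hd : PySem.Str.strip line ≠ "$$") :
    loopB out (line :: rest) = loopB (out ++ [line]) rest := by
  rw [loopB, if_neg hd]

-- main equivalence, by strong induction on the number of remaining lines
theorem loop_eq_main : ∀ n : Nat,
    (∀ ls : List String, ls.length ≤ n → ∀ out : List String,
      loopA out false false ls = loopB out ls) ∧
    (∀ ls : List String, ls.length ≤ n → ∀ out : List String,
      PySem.Str.strip out.getLast! ≠ "" →
      loopA out true false ls = mathRHS out ls) := by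
  intro n
  induction n using Nat.strong_induction_on with
  | _ n ih =>
    constructor
    · intro ls hlen out
      match ls with
      | [] => rw [loopB]; rfl
      | line :: rest =>
        have hr : rest.length < n := lt_of_lt_of_le (by simp) hlen
        by_cases hd : PySem.Str.strip line = "$$"
        · rw [loopB_cons_math out line rest hd]
          have step : loopA out false false (line :: rest)
              = loopA ((if out ≠ [] ∧ PySem.Str.strip out.getLast! ≠ "" then out ++ [""] else out) ++ ["$$"]) true false rest := by
            simp only [loopA, hd]; simp
          rw [step]
          exact (ih rest.length hr).2 rest le_rfl _ (by rw [getLastBang_concat]; decide)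
        · rw [loopB_cons_text out line rest hd]
          have step : loopA out false false (line :: rest) = loopA (out ++ [line]) false false rest := by
            simp only [loopA]; simp [hd]
          rw [step]
          exact (ih rest.length hr).1 rest le_rfl _
    · intro ls hlen out hlast
      match ls with
      | [] => rw [mathRHS_nil]; rfl
      | line :: rest =>
        have hr : rest.length < n := lt_of_lt_of_le (by simp) hlen
        by_cases hb : PySem.Str.strip line = ""
        · have hd : PySem.Str.strip line ≠ "$$" := by rw [hb]; decide
          rw [mathRHS_blank out line rest hb]
          have step : loopA out true false (line :: rest) = loopA out true false rest := by
            simp only [loopA, hb]; simp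
          rw [step]
          exact (ih rest.length hr).2 rest le_rfl out hlast
        · by_cases hd : PySem.Str.strip line = "$$"
          · rw [mathRHS_close out line rest hd]
            have hpop := popBlanksA_nonblank out hlast
            have step : loopA out true false (line :: rest) =
                if skipBlanksA rest ≠ [] ∧ PySem.Str.strip (skipBlanksA rest).head! ≠ "$$" then
                  loopA (out ++ ["$$"] ++ [""]) false true rest
                else loopA (out ++ ["$$"]) false false rest := by
              simp only [loopA, hd]; simp [hpop, List.append_assoc]
            rw [step, skipBlanks_eq]
            split_ifs with hcond
            · rw [loopA_skip, skipBlanks_eq]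
              have hlen3 : (skipBlanksB rest).length ≤ rest.length := skipBlanksB_length rest
              exact (ih rest.length hr).1 (skipBlanksB rest) hlen3 _
            · exact (ih rest.length hr).1 rest le_rfl _
          · rw [mathRHS_text out line rest hb hd]
            have step : loopA out true false (line :: rest) = loopA (out ++ [line]) true false rest := by
              simp only [loopA, hd]; simp [hb]
            rw [step]
            exact (ih rest.length hr).2 rest le_rfl _ (by rw [getLastBang_concat]; exact hb)

-- ===== VERDICT (by name: the statement is the Claim_ definition above) =====
theorem separate_display_math_py_spec : Claim_equal_separate_display_math_py := by
  intro content _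
  unfold Spec_separate_display_math_py separate_display_math_py separate_display_math_py_alt
  rw [(loop_eq_main (((PySem.Str.split? content "\n").getD [])).length).1 _ le_rfl]
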